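-- pv_equiv track=rewrite | github.com/casys-kaist/LLMServingSim | llm_profile/profiler/attention/batch_sampling.py | get_seq_lengths_to_profile
-- ===== SOURCE A (Python) =====
-- def get_seq_lengths_to_profile(max_seq_len: int):
--     SEQ_LENGTH_SIZE_SPACE = (
--         list(range(0, 1024 + 1, 32))
--         + list(range(1024, 4 * 1024 + 1, 64))
--         + list(range(4 * 1024, 64 * 1024 + 1, 256))
--     )
--     seq_lengths_to_profile = []
--     for seq_length in SEQ_LENGTH_SIZE_SPACE:
--         if seq_length < max_seq_len:
--             seq_lengths_to_profile.append(seq_length)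
--         else:
--             break
--     return seq_lengths_to_profile
-- ===== SOURCE B (Python) =====
-- import bisect
--
-- def get_seq_lengths_to_profile(max_seq_len: int):
--     SEQ_LENGTH_SIZE_SPACE = (
--         list(range(0, 1024 + 1, 32))
--         + list(range(1024, 4 * 1024 + 1, 64))
--         + list(range(4 * 1024, 64 * 1024 + 1, 256))
--     )
--     idx = bisect.bisect_left(SEQ_LENGTH_SIZE_SPACE, max_seq_len)
--     return SEQ_LENGTH_SIZE_SPACE[:idx]
-- ===== Notes on version B (the rewrite author's own statement) =====
-- stated objective: idiomatic
-- what changed: Replaces the linear prefix scan with an early break by a binary search (bisect.bisect_left) for the first grid element >= max_seq_len followed by a slice; correct because the grid is non-decreasing.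
import Mathlib
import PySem

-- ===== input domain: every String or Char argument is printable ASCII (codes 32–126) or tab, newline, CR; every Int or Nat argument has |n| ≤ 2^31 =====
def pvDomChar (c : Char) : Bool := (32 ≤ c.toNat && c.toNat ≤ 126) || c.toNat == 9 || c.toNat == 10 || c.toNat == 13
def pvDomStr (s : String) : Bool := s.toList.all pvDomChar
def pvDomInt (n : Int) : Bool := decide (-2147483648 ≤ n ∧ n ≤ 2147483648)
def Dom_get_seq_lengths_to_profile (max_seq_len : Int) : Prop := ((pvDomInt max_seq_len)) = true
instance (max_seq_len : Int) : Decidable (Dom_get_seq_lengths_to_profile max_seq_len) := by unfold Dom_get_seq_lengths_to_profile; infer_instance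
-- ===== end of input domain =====

-- B replaces A's linear scan-with-break by bisect_left (binary search) plus a slice; same return value.

-- ===== PORT A =====
-- SEQ_LENGTH_SIZE_SPACE, as A builds it
def seqSpaceA : List Int :=
  PySem.List.pyRange 0 (1024 + 1) 32
    ++ PySem.List.pyRange 1024 (4 * 1024 + 1) 64
    ++ PySem.List.pyRange (4 * 1024) (64 * 1024 + 1) 256

-- the for-loop with early break
def loopA (max_seq_len : Int) : List Int → List Int
  | [] => []
  | seq_length :: rest =>
    if seq_length < max_seq_len then seq_length :: loopA max_seq_len rest
    else []

def get_seq_lengths_to_profile (max_seq_len : Int) : List Int :=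
  loopA max_seq_len seqSpaceA

-- ===== PORT B =====
-- SEQ_LENGTH_SIZE_SPACE, as B builds it (same constant expression as in Source B)
def seqSpaceB : List Int :=
  PySem.List.pyRange 0 (1024 + 1) 32
    ++ PySem.List.pyRange 1024 (4 * 1024 + 1) 64
    ++ PySem.List.pyRange (4 * 1024) (64 * 1024 + 1) 256

-- CPython's bisect.bisect_left: binary search for the insertion point of x
def bisectLeftGo (a : List Int) (x : Int) (lo hi : Nat) : Nat :=
  if _h : lo < hi then
    let mid := (lo + hi) / 2
    if a.getD mid 0 < x then bisectLeftGo a x (mid + 1) hi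
    else bisectLeftGo a x lo mid
  else lo
termination_by hi - lo
decreasing_by all_goals omega

def bisectLeft (a : List Int) (x : Int) : Nat := bisectLeftGo a x 0 a.length

def get_seq_lengths_to_profile_alt (max_seq_len : Int) : List Int :=
  seqSpaceB.take (bisectLeft seqSpaceB max_seq_len)   -- a[:idx] with idx ≥ 0 is List.take

-- ===== PRECONDITION & SPEC =====
def Spec_get_seq_lengths_to_profile (max_seq_len : Int) (out : List Int) : Prop := out = get_seq_lengths_to_profile_alt max_seq_len
instance (max_seq_len : Int) (out : List Int) : Decidable (Spec_get_seq_lengths_to_profile max_seq_len out) := by unfold Spec_get_seq_lengths_to_profile; infer_instance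

-- ===== CLAIM (what is proved, stated in full; the proofs are below) =====
def Claim_equal_get_seq_lengths_to_profile : Prop := ∀ (max_seq_len : Int), Dom_get_seq_lengths_to_profile max_seq_len → Spec_get_seq_lengths_to_profile max_seq_len (get_seq_lengths_to_profile max_seq_len)

-- ===== LEMMAS AND PROOFS =====

-- A's loop is takeWhile (· < m)
theorem loopA_eq_takeWhile (m : Int) (l : List Int) :
    loopA m l = l.takeWhile (fun a => decide (a < m)) := by
  induction l with
  | nil => rfl
  | cons a rest ih =>
    by_cases h : a < m <;> simp [loopA, h, ih]

-- elements past the takeWhile prefix of a non-decreasing list are ≥ m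
theorem getD_ge_of_ge_k (m : Int) (l : List Int) (hs : l.Pairwise (· ≤ ·))
    (i : Nat) (hi : i < l.length)
    (hk : (l.takeWhile (fun a => decide (a < m))).length ≤ i) :
    ¬ l.getD i 0 < m := by
  induction l generalizing i with
  | nil => simp at hi
  | cons a rest ih =>
    rw [List.pairwise_cons] at hs
    by_cases ha : a < m
    · simp only [List.takeWhile_cons] at hk
      rw [if_pos (decide_eq_true ha)] at hk
      cases i with
      | zero => simp at hk
      | succ j =>
        rw [List.getD_cons_succ]
        exact ih hs.2 j (by simpa using hi) (by simp at hk; omega)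
    · cases i with
      | zero => simpa using ha
      | succ j =>
        have hj : j < rest.length := by simpa using hi
        have hmem : rest.getD j 0 ∈ rest := by
          rw [List.getD_eq_getElem _ _ hj]
          exact List.getElem_mem _
        rw [List.getD_cons_succ]
        intro hlt
        exact ha (lt_of_le_of_lt (hs.1 _ hmem) hlt)

-- elements inside the takeWhile prefix are < m
theorem getD_lt_of_lt_k (m : Int) (l : List Int)
    (i : Nat) (hi : i < (l.takeWhile (fun a => decide (a < m))).length) :
    l.getD i 0 < m := by
  induction l generalizing i with
  | nil => simp at hi
  | cons a rest ih =>
    by_cases ha : a < m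
    · simp only [List.takeWhile_cons] at hi
      rw [if_pos (decide_eq_true ha)] at hi
      cases i with
      | zero => simpa using ha
      | succ j =>
        rw [List.getD_cons_succ]
        exact ih j (by simp at hi; omega)
    · simp only [List.takeWhile_cons] at hi
      rw [if_neg (by simpa using ha)] at hi
      simp at hi

-- binary-search invariant: if the answer k lies in [lo, hi], bisectLeftGo finds it
theorem bisectLeftGo_eq (l : List Int) (m : Int) (hs : l.Pairwise (· ≤ ·))
    (lo hi : Nat) (hhi : hi ≤ l.length)
    (hlo : lo ≤ (l.takeWhile (fun a => decide (a < m))).length)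
    (hk : (l.takeWhile (fun a => decide (a < m))).length ≤ hi) :
    bisectLeftGo l m lo hi = (l.takeWhile (fun a => decide (a < m))).length := by
  rw [bisectLeftGo]
  by_cases h : lo < hi
  · simp only [h, dif_pos]
    set k := (l.takeWhile (fun a => decide (a < m))).length with hkdef
    set mid := (lo + hi) / 2 with hmid
    have hmlt : mid < hi := by omega
    have hmge : lo ≤ mid := by omega
    by_cases hc : l.getD mid 0 < m
    · have hmk : mid < k := by
        by_contra hge
        exact getD_ge_of_ge_k m l hs mid (by omega) (by omega) hc
      rw [if_pos hc]
      exact bisectLeftGo_eq l m hs (mid + 1) hi hhi (by omega) hk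
    · have hmk : k ≤ mid := by
        by_contra hlt
        exact hc (getD_lt_of_lt_k m l mid (by omega))
      rw [if_neg hc]
      exact bisectLeftGo_eq l m hs lo mid (by omega) hlo hmk
  · simp only [h, dif_neg, not_false_iff]
    omega
termination_by hi - lo
decreasing_by all_goals omega

set_option maxRecDepth 10000 in
theorem seqSpaceA_sorted : seqSpaceA.Pairwise (· ≤ ·) := by decide

theorem take_length_takeWhile (p : Int → Bool) (l : List Int) :
    l.take (l.takeWhile p).length = l.takeWhile p := by
  have h := List.take_left (l₁ := l.takeWhile p) (l₂ := l.dropWhile p)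
  rw [List.takeWhile_append_dropWhile] at h
  exact h

-- ===== VERDICT (by name: the statement is the Claim_ definition above) =====
theorem get_seq_lengths_to_profile_spec : Claim_equal_get_seq_lengths_to_profile := by
  intro m _
  unfold Spec_get_seq_lengths_to_profile get_seq_lengths_to_profile get_seq_lengths_to_profile_alt bisectLeft
  have hBA : seqSpaceB = seqSpaceA := rfl
  rw [hBA, loopA_eq_takeWhile,
    bisectLeftGo_eq seqSpaceA m seqSpaceA_sorted 0 seqSpaceA.length le_rfl
      (Nat.zero_le _) ((List.takeWhile_sublist _).length_le),
    take_length_takeWhile]
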